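-- pv_equiv track=rewrite | github.com/aviraonepiece/machine_learning | 用户异常行为检测/NB_all_Color.py | get_user_cmd_feature_all
-- ===== SOURCE A (Python) =====
-- def get_user_cmd_feature_all(user_cmd_list, dist):#传入上面函数返回的两个值，user_cmd_list是150个操作序列，dist上同fdist
--     user_cmd_feature=[]
--
--     for cmd_list in user_cmd_list:      #，150个序列，迭代150次 cmd_list,一个cmd_list代表一个序列,含100条命令
--         v=[0]*len(dist)                 #dist是fdist，值依照不同用户而不同，初始化向量为全零，User3 的v为107个
--
--         for i in range(0,len(dist)): #对于107个向量的分量进行迭代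
--             if dist[i] in cmd_list:  #如果向量的第i个分量（命令）在本次的cmd_list中被找到
--                 v[i]+=1                #对应的分量+1
--         user_cmd_feature.append(v)   #user_cmd_feature收纳对应本次cmd_list序列的向量
--
--     return user_cmd_feature     #对应有150个向量，每个向量有len(fdist)（去重后命令个数）个分量，user3为107个
-- ===== SOURCE B (Python) =====
-- def get_user_cmd_feature_all(user_cmd_list, dist):
--     # inverse index: each command -> all positions it occupies in dist
--     index = {}
--     for i, d in enumerate(dist):
--         index.setdefault(d, []).append(i)
--     result = []
--     for cmd_list in user_cmd_list:
--         v = [0] * len(dist)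
--         for cmd in cmd_list:
--             for pos in index.get(cmd, []):
--                 v[pos] = 1
--         result.append(v)
--     return result
-- ===== Notes on version B (the rewrite author's own statement) =====
-- stated objective: faster
-- what changed: Instead of scanning each cmd_list once per dist entry ('dist[i] in cmd_list'), B builds an inverse index from command to its positions in dist once, then walks each cmd_list once and sets v[pos]=1 at the indexed positions.
import Mathlib
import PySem

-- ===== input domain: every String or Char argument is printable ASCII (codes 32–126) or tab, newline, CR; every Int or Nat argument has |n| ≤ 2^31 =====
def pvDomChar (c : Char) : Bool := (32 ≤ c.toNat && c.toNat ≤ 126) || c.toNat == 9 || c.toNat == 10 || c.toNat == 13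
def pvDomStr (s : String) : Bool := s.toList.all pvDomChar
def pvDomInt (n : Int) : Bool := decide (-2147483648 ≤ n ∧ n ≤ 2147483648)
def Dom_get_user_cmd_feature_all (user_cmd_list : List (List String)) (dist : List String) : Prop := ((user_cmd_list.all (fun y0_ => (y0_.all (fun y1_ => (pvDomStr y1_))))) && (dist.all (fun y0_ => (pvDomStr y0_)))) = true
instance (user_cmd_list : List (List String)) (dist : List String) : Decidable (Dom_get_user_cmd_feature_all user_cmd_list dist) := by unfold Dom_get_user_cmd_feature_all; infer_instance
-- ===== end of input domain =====

-- B replaces A's per-feature scan of each sequence by an inverse index from command to its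
-- positions in dist, built once; each sequence is then walked once (objective: faster).

-- ===== PORT A =====
def get_user_cmd_feature_all (user_cmd_list : List (List String)) (dist : List String) : List (List Int) :=
  user_cmd_list.foldl (fun user_cmd_feature cmd_list =>
    let v0 : List Int := List.replicate dist.length 0
    -- i ranges over 0..len(dist)-1, so dist[i] and v[i] are always in range:
    -- pyGetD / getD / set with i.toNat are exact here
    let v := (PySem.List.pyRange 0 (dist.length : Int) 1).foldl (fun v i =>
      if cmd_list.contains (PySem.List.pyGetD dist i "") then
        v.set i.toNat (v.getD i.toNat 0 + 1)
      else v) v0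
    user_cmd_feature ++ [v]) []

-- ===== PORT B =====
def get_user_cmd_feature_all_alt (user_cmd_list : List (List String)) (dist : List String) : List (List Int) :=
  let index : PySem.Dict String (List Int) :=
    (PySem.List.enumerate dist 0).foldl
      (fun d p => d.insert p.2 (d.getD p.2 [] ++ [p.1])) PySem.Dict.empty
  user_cmd_list.foldl (fun result cmd_list =>
    let v0 : List Int := List.replicate dist.length 0
    -- every position stored in the index is a valid index of dist (hence of v):
    -- set with pos.toNat is exact here
    let v := cmd_list.foldl (fun v cmd =>
      (index.getD cmd []).foldl (fun v pos => v.set pos.toNat 1) v) v0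
    result ++ [v]) []

-- ===== PRECONDITION & SPEC =====
def Spec_get_user_cmd_feature_all (user_cmd_list : List (List String)) (dist : List String) (out : List (List Int)) : Prop := out = get_user_cmd_feature_all_alt user_cmd_list dist
instance (user_cmd_list : List (List String)) (dist : List String) (out : List (List Int)) : Decidable (Spec_get_user_cmd_feature_all user_cmd_list dist out) := by unfold Spec_get_user_cmd_feature_all; infer_instance

-- ===== CLAIM (what is proved, stated in full; the proofs are below) =====
def Claim_equal_get_user_cmd_feature_all : Prop := ∀ (user_cmd_list : List (List String)) (dist : List String), Dom_get_user_cmd_feature_all user_cmd_list dist → Spec_get_user_cmd_feature_all user_cmd_list dist (get_user_cmd_feature_all user_cmd_list dist)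

-- ===== LEMMAS AND PROOFS =====

-- the list of positions of c in l, counting from s
def pvPos (l : List String) (c : String) (s : Int) : List Int :=
  (PySem.List.enumerate l s).filterMap (fun p => if p.2 == c then some p.1 else none)

theorem pvPos_nil (c : String) (s : Int) : pvPos [] c s = [] := by
  simp [pvPos, PySem.List.enumerate_nil]

theorem pvPos_cons (x : String) (l : List String) (c : String) (s : Int) :
    pvPos (x :: l) c s = (if x == c then [s] else []) ++ pvPos l c (s + 1) := by
  by_cases hx : x = c <;>
    simp [pvPos, PySem.List.enumerate_cons, hx]

theorem mem_pvPos (l : List String) (c : String) : ∀ (s i : Int),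
    (i ∈ pvPos l c s ↔ ∃ k : Nat, k < l.length ∧ i = s + k ∧ l.getD k "" = c) := by
  induction l with
  | nil => intro s i; simp [pvPos_nil]
  | cons x l ih =>
    intro s i
    rw [pvPos_cons]
    constructor
    · intro h
      rcases List.mem_append.mp h with h | h
      · by_cases hx : x == c
        · rw [if_pos hx] at h
          simp at h
          exact ⟨0, by simp, by omega, by simpa using eq_of_beq hx⟩
        · rw [if_neg hx] at h; simp at h
      · rcases (ih (s + 1) i).mp h with ⟨k, hk, hi, hc⟩
        exact ⟨k + 1, by simpa using hk, by push_cast at hi ⊢; omega, by simpa using hc⟩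
    · rintro ⟨k, hk, hi, hc⟩
      cases k with
      | zero =>
        simp at hc hi
        subst hc hi
        simp
      | succ k =>
        refine List.mem_append.mpr (Or.inr ((ih (s + 1) i).mpr ⟨k, ?_, ?_, ?_⟩))
        · simpa using hk
        · push_cast at hi ⊢; omega
        · simpa using hc

theorem pvPos_nonneg (l : List String) (c : String) (i : Int) (h : i ∈ pvPos l c 0) : 0 ≤ i := by
  rcases (mem_pvPos l c 0 i).mp h with ⟨k, _, hi, _⟩
  omega

theorem mem_pvPos_zero (l : List String) (c : String) (j : Nat) (hj : j < l.length) :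
    ((j : Int) ∈ pvPos l c 0 ↔ l.getD j "" = c) := by
  rw [mem_pvPos]
  constructor
  · rintro ⟨k, hk, hi, hc⟩
    have : k = j := by omega
    subst this; exact hc
  · intro hc; exact ⟨j, hj, by omega, hc⟩

-- the inverse index maps each command to exactly its positions in dist
theorem pvIndex_getD (l : List String) : ∀ (s : Int) (d : PySem.Dict String (List Int)) (c : String),
    ((PySem.List.enumerate l s).foldl
      (fun d p => d.insert p.2 (d.getD p.2 [] ++ [p.1])) d).getD c []
    = d.getD c [] ++ pvPos l c s := by
  induction l with
  | nil => intro s d c; simp [pvPos_nil, PySem.List.enumerate_nil]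
  | cons x l ih =>
    intro s d c
    rw [PySem.List.enumerate_cons, List.foldl_cons, ih, pvPos_cons,
        PySem.Dict.getD_insert]
    by_cases hc : c = x
    · simp [hc]
    · simp [hc, Ne.symm hc]

theorem pvLen_set_fold (ps : List Int) : ∀ (v : List Int),
    (ps.foldl (fun v pos => v.set pos.toNat 1) v).length = v.length := by
  induction ps with
  | nil => intro v; rfl
  | cons p ps ih => intro v; rw [List.foldl_cons, ih]; simp

theorem pvSet_fold_get (ps : List Int) : ∀ (v : List Int) (j : Nat),
    (∀ p ∈ ps, 0 ≤ p) → j < v.length →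
    (ps.foldl (fun v pos => v.set pos.toNat 1) v)[j]? =
      if (j : Int) ∈ ps then some 1 else v[j]? := by
  induction ps with
  | nil => intro v j _ _; simp
  | cons p ps ih =>
    intro v j hnn hj
    rw [List.foldl_cons,
        ih _ j (fun q hq => hnn q (List.mem_cons_of_mem _ hq)) (by simpa using hj)]
    have hp0 : 0 ≤ p := hnn p List.mem_cons_self
    by_cases hmem : (j : Int) ∈ ps
    · rw [if_pos hmem, if_pos (List.mem_cons_of_mem _ hmem)]
    · rw [if_neg hmem, List.getElem?_set]
      by_cases hpj : p = (j : Int)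
      · have ht : p.toNat = j := by omega
        rw [if_pos ht, if_pos (by omega : p.toNat < v.length),
            if_pos (by simp [hpj] : (j : Int) ∈ p :: ps)]
      · have ht : ¬ p.toNat = j := by omega
        rw [if_neg ht, if_neg (by simp [hmem]; exact fun h => hpj h.symm)]

theorem pvLen_cmd_fold (dist : List String) (cs : List String) : ∀ (v : List Int),
    (cs.foldl (fun v cmd => (pvPos dist cmd 0).foldl (fun v pos => v.set pos.toNat 1) v) v).length
      = v.length := by
  induction cs with
  | nil => intro v; rfl
  | cons c cs ih => intro v; rw [List.foldl_cons, ih, pvLen_set_fold]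

theorem pvCmd_fold_get (dist : List String) (cs : List String) : ∀ (v : List Int),
    v.length = dist.length → ∀ j : Nat, j < v.length →
    (cs.foldl (fun v cmd => (pvPos dist cmd 0).foldl (fun v pos => v.set pos.toNat 1) v) v)[j]? =
      if dist.getD j "" ∈ cs then some 1 else v[j]? := by
  induction cs with
  | nil => intro v _ j _; simp
  | cons c cs ih =>
    intro v hv j hj
    rw [List.foldl_cons,
        ih _ (by rw [pvLen_set_fold]; exact hv) j (by rw [pvLen_set_fold]; exact hj),
        pvSet_fold_get _ _ j (fun p hp => pvPos_nonneg dist c p hp) hj]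
    simp only [List.mem_cons, mem_pvPos_zero dist c j (by omega)]
    split_ifs <;> tauto

-- A's inner loop, rewritten over List.range
theorem pvA_len (dist : List String) (cl : List String) (m : Nat) : ∀ (v : List Int),
    ((List.range m).foldl (fun v k =>
      if cl.contains (dist.getD k "") then v.set k (v.getD k 0 + 1) else v) v).length
      = v.length := by
  induction m with
  | zero => intro v; rfl
  | succ m ih =>
    intro v
    rw [List.range_succ, List.foldl_append, List.foldl_cons, List.foldl_nil]
    split
    · rw [List.length_set, ih]
    · exact ih v

theorem pvA_get (dist : List String) (cl : List String) (m : Nat) : ∀ (v : List Int),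
    v.length = dist.length → ∀ j : Nat, j < v.length →
    ((List.range m).foldl (fun v k =>
      if cl.contains (dist.getD k "") then v.set k (v.getD k 0 + 1) else v) v)[j]? =
      if j < m ∧ cl.contains (dist.getD j "") then some (v.getD j 0 + 1) else v[j]? := by
  induction m with
  | zero => intro v _ j _; simp
  | succ m ih =>
    intro v hv j hj
    rw [List.range_succ, List.foldl_append, List.foldl_cons, List.foldl_nil]
    set W := (List.range m).foldl (fun v k =>
      if cl.contains (dist.getD k "") then v.set k (v.getD k 0 + 1) else v) v with hW
    have hWlen : W.length = v.length := pvA_len dist cl m v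
    by_cases hm : cl.contains (dist.getD m "")
    · rw [if_pos hm]
      by_cases hjm : j = m
      · subst hjm
        rw [List.getElem?_set, if_pos rfl, if_pos (by omega : j < W.length)]
        have hWj : W[j]? = v[j]? := by
          rw [hW, ih v hv j hj, if_neg (by omega : ¬ (j < j ∧ cl.contains (dist.getD j "") = true))]
        have hWgd : W.getD j 0 = v.getD j 0 := by
          simp [List.getD, hWj]
        rw [hWgd, if_pos ⟨by omega, hm⟩]
      · rw [List.getElem?_set, if_neg (by omega : ¬ m = j), ih v hv j hj]
        by_cases h1 : j < m ∧ cl.contains (dist.getD j "") = true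
        · rw [if_pos h1, if_pos (⟨by omega, h1.2⟩ : j < m + 1 ∧ cl.contains (dist.getD j "") = true)]
        · rw [if_neg h1, if_neg (show ¬ (j < m + 1 ∧ cl.contains (dist.getD j "") = true) from
            fun h => h1 ⟨by omega, h.2⟩)]
    · rw [if_neg hm, ih v hv j hj]
      by_cases hjm : j = m
      · subst hjm
        rw [if_neg (by omega : ¬ (j < j ∧ cl.contains (dist.getD j "") = true)),
            if_neg (show ¬ (j < j + 1 ∧ cl.contains (dist.getD j "") = true) from
              fun h => hm h.2)]
      · by_cases h1 : j < m ∧ cl.contains (dist.getD j "") = true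
        · rw [if_pos h1, if_pos (⟨by omega, h1.2⟩ : j < m + 1 ∧ cl.contains (dist.getD j "") = true)]
        · rw [if_neg h1, if_neg (show ¬ (j < m + 1 ∧ cl.contains (dist.getD j "") = true) from
            fun h => h1 ⟨by omega, h.2⟩)]

theorem pvInner_eq (dist : List String) (cl : List String) :
    (PySem.List.pyRange 0 (dist.length : Int) 1).foldl (fun v i =>
      if cl.contains (PySem.List.pyGetD dist i "") then
        v.set i.toNat (v.getD i.toNat 0 + 1)
      else v) (List.replicate dist.length (0 : Int))
    = cl.foldl (fun v cmd => (pvPos dist cmd 0).foldl (fun v pos => v.set pos.toNat 1) v)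
        (List.replicate dist.length (0 : Int)) := by
  rw [PySem.List.pyRange_zero_nat dist.length, List.foldl_map]
  rw [show (fun (x : List Int) (y : Nat) =>
      if cl.contains (PySem.List.pyGetD dist ((y : Int)) "") then
        x.set (y : Int).toNat ((x.getD (y : Int).toNat 0 + 1)) else x)
      = fun (v : List Int) (k : Nat) =>
      if cl.contains (dist.getD k "") then v.set k (v.getD k 0 + 1) else v from by
    funext v k
    simp only [PySem.List.pyGetD_natCast, Int.toNat_natCast]]
  apply List.ext_getElem?
  intro j
  by_cases hj : j < dist.length
  · rw [pvA_get dist cl dist.length _ (by simp) j (by simpa using hj),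
        pvCmd_fold_get dist cl _ (by simp) j (by simpa using hj)]
    have hgd : (List.replicate dist.length (0 : Int)).getD j 0 = 0 := by
      simp [List.getD, hj]
    have hge : (List.replicate dist.length (0 : Int))[j]? = some 0 := by
      simp [hj]
    rw [hgd, hge]
    by_cases hc : dist.getD j "" ∈ cl
    · rw [if_pos ⟨hj, by simpa [List.contains_iff_mem] using hc⟩, if_pos hc]
      norm_num
    · rw [if_neg (by intro h; exact hc (by simpa [List.contains_iff_mem] using h.2)),
          if_neg hc]
  · rw [List.getElem?_eq_none (by rw [pvA_len]; simpa using hj),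
        List.getElem?_eq_none (by rw [pvLen_cmd_fold]; simpa using hj)]

-- ===== VERDICT (by name: the statement is the Claim_ definition above) =====
theorem get_user_cmd_feature_all_spec : Claim_equal_get_user_cmd_feature_all := by
  intro user_cmd_list dist _
  unfold Spec_get_user_cmd_feature_all get_user_cmd_feature_all get_user_cmd_feature_all_alt
  simp only [PySem.List.foldl_append_singleton_eq_map, List.nil_append]
  apply List.map_congr_left
  intro cl _
  refine Eq.trans (pvInner_eq dist cl) ?_
  congr 1
  funext v cmd
  rw [pvIndex_getD dist 0 PySem.Dict.empty cmd]
  simp
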